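-- pv_equiv track=rewrite | github.com/larsgroeber/prg1 | PRG1/sheet7/7_3.py | get_points_from_dice
-- ===== SOURCE A (Python) =====
-- def get_points_from_dice(dice_numbers):
--     """Returns the points a given dice throw yields."""
--     result = 0
--     for dice in dice_numbers:
--         if dice == 1:
--             result += 100
--         elif dice == 6:
--             result += 60
--         else:
--             result += dice
--     return result
-- ===== SOURCE B (Python) =====
-- def get_points_from_dice(dice_numbers):
--     """Returns the points a given dice throw yields."""
--     dice_numbers = list(dice_numbers)
--     return sum(dice_numbers) + 99 * dice_numbers.count(1) + 54 * dice_numbers.count(6)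
-- ===== Notes on version B (the rewrite author's own statement) =====
-- stated objective: simpler
-- what changed: Replaces the per-element if/elif accumulation with a closed-form aggregate: plain sum plus 99 per die equal to 1 and 54 per die equal to 6 via count().
import Mathlib
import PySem

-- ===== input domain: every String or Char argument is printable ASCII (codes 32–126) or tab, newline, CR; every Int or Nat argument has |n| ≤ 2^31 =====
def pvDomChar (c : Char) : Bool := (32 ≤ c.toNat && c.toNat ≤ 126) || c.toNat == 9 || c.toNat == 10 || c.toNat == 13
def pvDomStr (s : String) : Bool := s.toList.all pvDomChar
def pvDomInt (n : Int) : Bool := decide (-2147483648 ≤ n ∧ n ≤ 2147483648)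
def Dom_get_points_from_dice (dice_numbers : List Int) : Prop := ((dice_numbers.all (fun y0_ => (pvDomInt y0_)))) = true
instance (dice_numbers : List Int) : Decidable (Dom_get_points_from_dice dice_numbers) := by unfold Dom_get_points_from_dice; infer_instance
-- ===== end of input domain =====

-- ===== PORT A =====
-- transliteration of A: fold over the dice, branching on 1 / 6 / other
def get_points_from_dice (dice_numbers : List Int) : Int :=
  dice_numbers.foldl (fun result dice =>
    if dice == 1 then result + 100
    else if dice == 6 then result + 60
    else result + dice) 0

-- ===== PORT B =====
-- B: plain sum plus closed-form adjustment per count of 1s and 6s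
def get_points_from_dice_alt (dice_numbers : List Int) : Int :=
  dice_numbers.sum + 99 * (PySem.List.count dice_numbers 1 : Int) + 54 * (PySem.List.count dice_numbers 6 : Int)

-- ===== PRECONDITION & SPEC =====
def Spec_get_points_from_dice (dice_numbers : List Int) (out : Int) : Prop := out = get_points_from_dice_alt dice_numbers
instance (dice_numbers : List Int) (out : Int) : Decidable (Spec_get_points_from_dice dice_numbers out) := by unfold Spec_get_points_from_dice; infer_instance

-- ===== CLAIM (what is proved, stated in full; the proofs are below) =====
def Claim_equal_get_points_from_dice : Prop := ∀ (dice_numbers : List Int), Dom_get_points_from_dice dice_numbers → Spec_get_points_from_dice dice_numbers (get_points_from_dice dice_numbers)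

-- ===== LEMMAS AND PROOFS =====

-- ===== VERDICT (by name: the statement is the Claim_ definition above) =====
lemma fold_eq (xs : List Int) (a : Int) :
    xs.foldl (fun result dice =>
      if dice == 1 then result + 100
      else if dice == 6 then result + 60
      else result + dice) a
    = a + xs.sum + 99 * (xs.count 1 : Int) + 54 * (xs.count 6 : Int) := by
  induction xs generalizing a with
  | nil => simp
  | cons x xs ih =>
    simp only [List.foldl_cons, List.sum_cons, List.count_cons, ih]
    by_cases h1 : x = 1 <;> by_cases h6 : x = 6 <;>
      simp [h1, h6] <;> ring

theorem get_points_from_dice_spec : Claim_equal_get_points_from_dice := by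
  intro xs _
  unfold Spec_get_points_from_dice get_points_from_dice get_points_from_dice_alt
  rw [fold_eq, PySem.List.count_eq, PySem.List.count_eq]
  ring
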